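-- pv_equiv track=rewrite | github.com/jenkins957/advent-of-code | advent_of_code_2016/day7_ip_v7.py | is_abba
-- ===== SOURCE A (Python) =====
-- def is_abba(text):
--     if len(text) != 4:
--         return False
--
--     chars = set()
--     for c in text:
--         chars.add(c)
--
--     if len(chars) == 2 and text == text[::-1]:
--         return True
--
--     return False
-- ===== SOURCE B (Python) =====
-- def is_abba(text):
--     return (len(text) == 4 and text[0] == text[3]
--             and text[1] == text[2] and text[0] != text[1])
-- ===== Notes on version B (the rewrite author's own statement) =====
-- stated objective: simpler
-- what changed: Replaces the character-set loop and the slice-reversal palindrome test by a single boolean of four positional comparisons (a length-4 palindrome has exactly two distinct characters iff its first two characters differ), so no loop, no set and no reversed copy remain.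
import Mathlib
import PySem

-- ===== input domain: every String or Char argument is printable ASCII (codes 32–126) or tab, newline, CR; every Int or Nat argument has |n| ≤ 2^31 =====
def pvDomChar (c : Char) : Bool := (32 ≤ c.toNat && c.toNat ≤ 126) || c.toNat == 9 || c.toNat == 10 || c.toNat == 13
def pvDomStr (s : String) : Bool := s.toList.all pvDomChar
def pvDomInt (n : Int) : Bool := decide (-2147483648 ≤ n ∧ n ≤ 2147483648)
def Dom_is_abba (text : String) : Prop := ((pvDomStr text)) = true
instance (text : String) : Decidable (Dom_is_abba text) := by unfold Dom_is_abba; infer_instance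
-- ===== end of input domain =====

-- B replaces A's character-set loop and slice-reversal palindrome test by four positional comparisons (simpler; same O(1) cost).

-- ===== PORT A =====
def is_abba (text : String) : Bool :=
  if text.toList.length ≠ 4 then false
  else
    -- chars = set(); for c in text: chars.add(c)
    let chars : PySem.Set Char := text.toList.foldl PySem.Set.add PySem.Set.empty
    if chars.length = 2 ∧ PySem.List.slice? text.toList none none (-1) = some text.toList then true
    else false

-- ===== PORT B =====
def is_abba_alt (text : String) : Bool :=
  decide (text.toList.length = 4) &&
    (PySem.Str.pyGet? text 0 == PySem.Str.pyGet? text 3) &&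
    (PySem.Str.pyGet? text 1 == PySem.Str.pyGet? text 2) &&
    !(PySem.Str.pyGet? text 0 == PySem.Str.pyGet? text 1)

-- ===== PRECONDITION & SPEC =====
def Spec_is_abba (text : String) (out : Bool) : Prop := out = is_abba_alt text
instance (text : String) (out : Bool) : Decidable (Spec_is_abba text out) := by unfold Spec_is_abba; infer_instance

-- ===== CLAIM (what is proved, stated in full; the proofs are below) =====
def Claim_equal_is_abba : Prop := ∀ (text : String), Dom_is_abba text → Spec_is_abba text (is_abba text)

-- ===== LEMMAS AND PROOFS =====

-- Both ports depend on the string only through its character list; on a 4-element list everything reduces by cases on the character equalities.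
theorem is_abba_eq_of_len4 (a b c d : Char) (h : text.toList = [a, b, c, d]) :
    is_abba text = is_abba_alt text := by
  simp only [is_abba, is_abba_alt, PySem.List.slice?_none_none_neg_one]
  simp only [PySem.Str.pyGet?, h, PySem.Chars.pyGet?, PySem.List.pyGet?, PySem.List.pyIdx?]
  by_cases hab : a = b <;> by_cases hac : a = c <;> by_cases had : a = d <;>
    by_cases hbc : b = c <;> by_cases hbd : b = d <;> by_cases hcd : c = d <;>
    simp_all [PySem.Set.add, PySem.Set.empty, PySem.Set.contains]

-- ===== VERDICT (by name: the statement is the Claim_ definition above) =====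
theorem is_abba_spec : Claim_equal_is_abba := by
  intro text _
  unfold Spec_is_abba
  match h : text.toList with
  | [a, b, c, d] => exact is_abba_eq_of_len4 a b c d h
  | [] | [_] | [_, _] | [_, _, _] | _ :: _ :: _ :: _ :: _ :: _ =>
      simp [is_abba, is_abba_alt, h, PySem.Str.pyGet?, PySem.Chars.pyGet?,
            PySem.List.pyGet?, PySem.List.pyIdx?]
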